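-- pv_equiv track=rewrite | github.com/PathakTushar/Dsa-codes | Tushar_S20210010231_AssignAI_02.py | algoForConstraintSatisfactionAlgorithm
-- ===== SOURCE A (Python) =====
-- from itertools import permutations
--
-- def algoForConstraintSatisfactionAlgorithm(arrayOfStrings, string):
--     differentCharInSets = set()
--     for eachWord in arrayOfStrings:
--         differentCharInSets.update(set(eachWord))
--     differentCharInSets.update(set(string))
--
--     cspMatching = permutations(range(10), len(differentCharInSets))
--
--     for cspMatch in cspMatching:
--         tempDictionary = {char: digit for char, digit in zip(differentCharInSets, cspMatch)}
--
--         valuesOfArrayInCSP = [int(''.join([str(tempDictionary[char])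
--                         for char in eachWord])) for eachWord in arrayOfStrings]
--         valuesOfStringInCSP = int(''.join([str(tempDictionary[char]) for char in string]))
--
--         if sum(valuesOfArrayInCSP) == valuesOfStringInCSP:
--             return "Yes"
--
--     return "No"
-- ===== SOURCE B (Python) =====
-- def algoForConstraintSatisfactionAlgorithm(arrayOfStrings, string):
--     # distinct letters, in first-seen order
--     letters = []
--     for word in arrayOfStrings:
--         for ch in word:
--             if ch not in letters:
--                 letters.append(ch)
--     for ch in string:
--         if ch not in letters:
--             letters.append(ch)
--
--     if len(letters) > 10:
--         return "No"   # more letters than digits: no injective assignment exists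
--
--     def value(assignment, word):
--         return int(''.join(str(assignment[ch]) for ch in word))
--
--     def backtrack(remaining, assignment, used):
--         if not remaining:
--             return sum(value(assignment, w) for w in arrayOfStrings) == value(assignment, string)
--         ch, rest = remaining[0], remaining[1:]
--         for digit in range(10):
--             if digit not in used:
--                 if backtrack(rest, {**assignment, ch: digit}, used | {digit}):
--                     return True
--         return False
--
--     return "Yes" if backtrack(letters, {}, set()) else "No"
-- ===== Notes on version B (the rewrite author's own statement) =====
-- stated objective: alternative
-- what changed: Replaces the itertools.permutations generate-and-test scan (rebuilding the full char->digit dict for every candidate tuple) by recursive backtracking over the distinct letters with a used-digit set, extending the assignment incrementally and returning on the first success.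
import Mathlib
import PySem

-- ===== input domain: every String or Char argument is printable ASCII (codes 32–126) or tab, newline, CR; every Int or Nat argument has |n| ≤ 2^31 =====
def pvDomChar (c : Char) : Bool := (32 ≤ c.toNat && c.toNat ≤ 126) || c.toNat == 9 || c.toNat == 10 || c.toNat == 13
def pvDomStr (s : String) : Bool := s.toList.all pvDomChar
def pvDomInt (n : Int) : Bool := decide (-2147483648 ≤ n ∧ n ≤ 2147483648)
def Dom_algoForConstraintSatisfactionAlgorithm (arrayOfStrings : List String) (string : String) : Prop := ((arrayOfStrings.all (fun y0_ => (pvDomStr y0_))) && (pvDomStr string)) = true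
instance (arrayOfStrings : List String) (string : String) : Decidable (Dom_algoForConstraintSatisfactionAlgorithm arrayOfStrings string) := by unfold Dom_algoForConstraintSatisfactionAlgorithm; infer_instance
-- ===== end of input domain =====

-- B replaces the materialized itertools.permutations scan by recursive backtracking over the
-- letters with a used-digit set (objective: alternative; same worst-case cost).

-- ===== PORT A =====
-- int(''.join([str(tempDictionary[char]) for char in eachWord])); the dict lookup never misses
-- (every char of every word is in the dict), so getD's default is dead; ofStr? is none only for
-- an empty word, which Pre_ excludes — .getD 0 is dead code under Pre_.
def pvWordValA (tempDictionary : PySem.Dict Char Int) (eachWord : List Char) : Int :=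
  (PySem.Int.ofStr? (PySem.Str.join "" (eachWord.map (fun c => PySem.Int.toStr (tempDictionary.getD c 0))))).getD 0

-- 'for cspMatch in cspMatching: … return "Yes" … / return "No"'
def pvLoopA (arrayOfStrings : List String) (string : String) (cs : List Char) : List (List Int) → String
  | [] => "No"
  | cspMatch :: restMatches =>
    let tempDictionary : PySem.Dict Char Int :=
      (cs.zip cspMatch).foldl (fun d p => d.insert p.1 p.2) PySem.Dict.empty
    let valuesOfArrayInCSP := arrayOfStrings.map (fun w => pvWordValA tempDictionary w.toList)
    let valuesOfStringInCSP := pvWordValA tempDictionary string.toList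
    if valuesOfArrayInCSP.sum == valuesOfStringInCSP then "Yes"
    else pvLoopA arrayOfStrings string cs restMatches

def algoForConstraintSatisfactionAlgorithm (arrayOfStrings : List String) (string : String) : String :=
  let differentCharInSets : PySem.Set Char :=
    PySem.Set.update
      (arrayOfStrings.foldl (fun s w => PySem.Set.update s (PySem.Set.ofList w.toList)) PySem.Set.empty)
      (PySem.Set.ofList string.toList)
  let cspMatching := PySem.List.permutations (PySem.List.pyRange 0 10 1) differentCharInSets.length
  pvLoopA arrayOfStrings string differentCharInSets cspMatching

-- ===== PORT B =====
-- int(''.join(str(assignment[ch]) for ch in word)) — same dead defaults as in port A.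
def pvValueB (assignment : PySem.Dict Char Int) (word : List Char) : Int :=
  (PySem.Int.ofStr? (PySem.Str.join "" (word.map (fun c => PySem.Int.toStr (assignment.getD c 0))))).getD 0

-- 'for digit in range(10): if digit not in used: if backtrack(...): return True / return False'
def pvBacktrackB (arrayOfStrings : List String) (string : String) :
    List Char → PySem.Dict Char Int → PySem.Set Int → Bool
  | [], assignment, _ =>
    (arrayOfStrings.map (fun w => pvValueB assignment w.toList)).sum == pvValueB assignment string.toList
  | ch :: rest, assignment, used =>
    (PySem.List.pyRange 0 10 1).any (fun digit =>
      !(used.contains digit) && pvBacktrackB arrayOfStrings string rest (assignment.insert ch digit) (used.add digit))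

def algoForConstraintSatisfactionAlgorithm_alt (arrayOfStrings : List String) (string : String) : String :=
  let letters : PySem.Set Char :=
    string.toList.foldl PySem.Set.add
      (arrayOfStrings.foldl (fun acc w => w.toList.foldl PySem.Set.add acc) PySem.Set.empty)
  if 10 < letters.length then "No"
  else if pvBacktrackB arrayOfStrings string letters PySem.Dict.empty PySem.Set.empty then "Yes" else "No"

-- ===== PRECONDITION & SPEC =====
-- Pre_ excludes exactly the inputs where Python A raises ValueError on int(''): an empty word or
-- an empty target string, except when more than 10 distinct letters make the permutation
-- iterator empty (then A returns "No" before evaluating anything).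
def Pre_algoForConstraintSatisfactionAlgorithm (arrayOfStrings : List String) (string : String) : Prop :=
  ((∀ w ∈ arrayOfStrings, w ≠ "") ∧ string ≠ "") ∨
    10 < (PySem.List.dedup ((arrayOfStrings.map String.toList).flatten ++ string.toList)).length
instance (arrayOfStrings : List String) (string : String) : Decidable (Pre_algoForConstraintSatisfactionAlgorithm arrayOfStrings string) := by unfold Pre_algoForConstraintSatisfactionAlgorithm; infer_instance

def pvWitness_algoForConstraintSatisfactionAlgorithm : List String × String := (["AB", "C"], "DB")

def Spec_algoForConstraintSatisfactionAlgorithm (arrayOfStrings : List String) (string : String) (out : String) : Prop := out = algoForConstraintSatisfactionAlgorithm_alt arrayOfStrings string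
instance (arrayOfStrings : List String) (string : String) (out : String) : Decidable (Spec_algoForConstraintSatisfactionAlgorithm arrayOfStrings string out) := by unfold Spec_algoForConstraintSatisfactionAlgorithm; infer_instance

-- ===== CLAIM (what is proved, stated in full; the proofs are below) =====
def Claim_equal_algoForConstraintSatisfactionAlgorithm : Prop := ∀ (arrayOfStrings : List String) (string : String), Dom_algoForConstraintSatisfactionAlgorithm arrayOfStrings string → Pre_algoForConstraintSatisfactionAlgorithm arrayOfStrings string → Spec_algoForConstraintSatisfactionAlgorithm arrayOfStrings string (algoForConstraintSatisfactionAlgorithm arrayOfStrings string)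

-- ===== LEMMAS AND PROOFS =====

theorem pvWitness_ok :
    Dom_algoForConstraintSatisfactionAlgorithm pvWitness_algoForConstraintSatisfactionAlgorithm.1 pvWitness_algoForConstraintSatisfactionAlgorithm.2 ∧
    Pre_algoForConstraintSatisfactionAlgorithm pvWitness_algoForConstraintSatisfactionAlgorithm.1 pvWitness_algoForConstraintSatisfactionAlgorithm.2 := by
  decide

-- the available digits, given the set of used ones
def pvAvail (used : PySem.Set Int) : List Int :=
  (PySem.List.pyRange 0 10 1).filter (fun d => !(used.contains d))

-- A's leaf test, shared shape of both ports' final comparison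
def pvLeaf (arrayOfStrings : List String) (string : String) (d : PySem.Dict Char Int) : Bool :=
  (arrayOfStrings.map (fun w => pvWordValA d w.toList)).sum == pvWordValA d string.toList

theorem pvLoopA_eq_any (arrayOfStrings : List String) (string : String) (cs : List Char)
    (ps : List (List Int)) :
    pvLoopA arrayOfStrings string cs ps =
      if ps.any (fun p => pvLeaf arrayOfStrings string ((cs.zip p).foldl (fun d q => d.insert q.1 q.2) PySem.Dict.empty)) then "Yes" else "No" := by
  induction ps with
  | nil => simp [pvLoopA]
  | cons p rest ih =>
    simp only [pvLoopA, List.any_cons, ih, pvLeaf]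
    by_cases h : ((arrayOfStrings.map (fun w => pvWordValA ((cs.zip p).foldl (fun d q => d.insert q.1 q.2) PySem.Dict.empty) w.toList)).sum == pvWordValA ((cs.zip p).foldl (fun d q => d.insert q.1 q.2) PySem.Dict.empty) string.toList) <;>
      simp [h]

theorem pvAvail_nodup (used : PySem.Set Int) : (pvAvail used).Nodup :=
  (PySem.List.nodup_pyRange_one 0 10).filter _

theorem pvAvail_add (used : PySem.Set Int) (d : Int) :
    pvAvail (used.add d) = (pvAvail used).filter (fun x => x != d) := by
  simp only [pvAvail, List.filter_filter]
  apply List.filter_congr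
  intro x _
  have key : (PySem.Set.add used d).contains x = ((used.contains x) || (x == d)) := by
    rw [Bool.eq_iff_iff]
    simp [PySem.Set.mem_add]
  rw [key]
  cases h1 : used.contains x <;> by_cases hxd : x = d <;> simp [hxd, bne]

theorem pvAvail_empty : pvAvail PySem.Set.empty = PySem.List.pyRange 0 10 1 := by decide

-- eraseIdx on a Nodup list is filtering out the element at that index
theorem eraseIdx_eq_filter_of_nodup {l : List Int} (h : l.Nodup) (i : Nat) (hi : i < l.length) :
    l.eraseIdx i = l.filter (fun x => x != l[i]) := by
  rw [← List.Nodup.erase_getElem h i hi, List.Nodup.erase_eq_filter h]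

-- the backtracking search finds an extension iff some permutation of the available digits works
theorem pvBacktrack_iff (arrayOfStrings : List String) (string : String) :
    ∀ (remaining : List Char) (assignment : PySem.Dict Char Int) (used : PySem.Set Int),
      pvBacktrackB arrayOfStrings string remaining assignment used = true ↔
        ∃ p ∈ PySem.List.permutations (pvAvail used) remaining.length,
          pvLeaf arrayOfStrings string ((remaining.zip p).foldl (fun d q => d.insert q.1 q.2) assignment) = true := by
  intro remaining
  induction remaining with
  | nil =>
    intro assignment used
    simp [pvBacktrackB, PySem.List.permutations_zero, pvLeaf, pvWordValA, pvValueB]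
  | cons ch rest ih =>
    intro assignment used
    constructor
    · intro h
      simp only [pvBacktrackB, List.any_eq_true, Bool.and_eq_true, Bool.not_eq_true'] at h
      obtain ⟨digit, hmem, hnc, hbt⟩ := h
      obtain ⟨p', hp', hleaf⟩ := (ih (assignment.insert ch digit) (used.add digit)).mp hbt
      have hdav : digit ∈ pvAvail used := by
        simp only [pvAvail, List.mem_filter, Bool.not_eq_true']
        exact ⟨hmem, hnc⟩
      obtain ⟨i, hi, hdi⟩ := List.getElem_of_mem hdav
      refine ⟨digit :: p', ?_, ?_⟩
      · rw [List.length_cons, PySem.List.permutations_succ, List.mem_flatMap]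
        refine ⟨i, List.mem_range.mpr hi, ?_⟩
        have : (pvAvail used)[i]? = some digit := by
          rw [List.getElem?_eq_getElem hi, hdi]
        rw [this]
        simp only [List.mem_map]
        refine ⟨p', ?_, rfl⟩
        rwa [eraseIdx_eq_filter_of_nodup (pvAvail_nodup used) i hi, hdi, ← pvAvail_add]
      · simpa using hleaf
    · intro h
      obtain ⟨p, hp, hleaf⟩ := h
      rw [List.length_cons, PySem.List.permutations_succ, List.mem_flatMap] at hp
      obtain ⟨i, hi, hpi⟩ := hp
      rw [List.mem_range] at hi
      rw [List.getElem?_eq_getElem hi] at hpi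
      simp only [List.mem_map] at hpi
      obtain ⟨p', hp', rfl⟩ := hpi
      set digit := (pvAvail used)[i] with hdig
      have hdav : digit ∈ pvAvail used := List.getElem_mem hi
      have hmem0 : digit ∈ PySem.List.pyRange 0 10 1 ∧ (!used.contains digit) = true := by
        have := List.mem_filter.mp hdav
        exact ⟨this.1, this.2⟩
      simp only [pvBacktrackB, List.any_eq_true, Bool.and_eq_true]
      refine ⟨digit, hmem0.1, hmem0.2, ?_⟩
      apply (ih (assignment.insert ch digit) (used.add digit)).mpr
      refine ⟨p', ?_, ?_⟩
      · rwa [pvAvail_add, ← eraseIdx_eq_filter_of_nodup (pvAvail_nodup used) i hi]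
      · simpa using hleaf

-- s.update(set(xs)) = s.update(xs)
theorem update_ofList_eq_update (s : PySem.Set Char) (xs : List Char) :
    PySem.Set.update s (PySem.Set.ofList xs) = PySem.Set.update s xs := by
  rw [PySem.Set.update_eq_append_filter, PySem.Set.update_eq_append_filter, PySem.Set.ofList_ofList]

-- A's character set equals B's first-seen letter list
theorem chars_eq (arrayOfStrings : List String) (string : String) :
    PySem.Set.update
        (arrayOfStrings.foldl (fun s w => PySem.Set.update s (PySem.Set.ofList w.toList)) PySem.Set.empty)
        (PySem.Set.ofList string.toList) =
      string.toList.foldl PySem.Set.add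
        (arrayOfStrings.foldl (fun acc w => w.toList.foldl PySem.Set.add acc) PySem.Set.empty) := by
  have hinner : ∀ (s : PySem.Set Char),
      arrayOfStrings.foldl (fun s w => PySem.Set.update s (PySem.Set.ofList w.toList)) s =
        arrayOfStrings.foldl (fun acc w => w.toList.foldl PySem.Set.add acc) s := by
    intro s
    apply PySem.List.foldl_congr_mem
    intro acc w _
    rw [update_ofList_eq_update, PySem.Set.update_eq_foldl]
  rw [update_ofList_eq_update, PySem.Set.update_eq_foldl, hinner]

-- ===== VERDICT (by name: the statement is the Claim_ definition above) =====
theorem algoForConstraintSatisfactionAlgorithm_spec : Claim_equal_algoForConstraintSatisfactionAlgorithm := by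
  intro arrayOfStrings string _ _
  unfold Spec_algoForConstraintSatisfactionAlgorithm
  unfold algoForConstraintSatisfactionAlgorithm algoForConstraintSatisfactionAlgorithm_alt
  rw [chars_eq]
  set cs := string.toList.foldl PySem.Set.add
      (arrayOfStrings.foldl (fun acc w => w.toList.foldl PySem.Set.add acc) PySem.Set.empty) with hcs
  show pvLoopA arrayOfStrings string cs (PySem.List.permutations (PySem.List.pyRange 0 10 1) cs.length) =
    (if 10 < cs.length then "No"
     else if pvBacktrackB arrayOfStrings string cs PySem.Dict.empty PySem.Set.empty then "Yes" else "No")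
  by_cases h10 : 10 < cs.length
  · rw [if_pos h10]
    have hlen : (PySem.List.pyRange 0 10 1).length < cs.length := by
      rw [PySem.List.length_pyRange_one]; omega
    rw [PySem.List.permutations_eq_nil_of_length_lt _ _ hlen]
    rfl
  rw [if_neg h10]
  rw [pvLoopA_eq_any]
  have hbt := pvBacktrack_iff arrayOfStrings string cs PySem.Dict.empty PySem.Set.empty
  rw [pvAvail_empty] at hbt
  have hany : (PySem.List.permutations (PySem.List.pyRange 0 10 1) cs.length).any
      (fun p => pvLeaf arrayOfStrings string ((cs.zip p).foldl (fun d q => d.insert q.1 q.2) PySem.Dict.empty)) =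
      pvBacktrackB arrayOfStrings string cs PySem.Dict.empty PySem.Set.empty := by
    rw [Bool.eq_iff_iff, List.any_eq_true]
    exact hbt.symm
  rw [hany]
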